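-- pv_equiv track=rewrite | github.com/kinglegendzzh/chordPrediction | hmm/usingHmm.py | get_rel_pitch_seq
-- ===== SOURCE A (Python) =====
-- SCALE_STEPS = [2, 2, 1, 2, 2, 2, 1]  # 7个音符，分别间隔2、2、1、2、2、2、1
--
-- def get_rel_pitch_seq(melody_code):
--     rel_pitch_seq = []
--     current_note = 0
--     for step in SCALE_STEPS:
--         rel_pitch_seq.append(current_note)
--         current_note += step
--         if current_note > 11:
--             current_note -= 12
--     rel_pitch_seq = [rel_pitch_seq[idx % 7] for idx in melody_code]
--     return rel_pitch_seq
-- ===== SOURCE B (Python) =====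
-- def get_rel_pitch_seq(melody_code):
--     # closed form: major-scale degree d maps to 2*d minus one half-step after the third degree
--     return [2 * (i % 7) - (1 if i % 7 > 2 else 0) for i in melody_code]
-- ===== Notes on version B (the rewrite author's own statement) =====
-- stated objective: simpler
-- what changed: Replaces the scale-table-building loop plus lookup with a one-line comprehension that computes each pitch directly via the closed form 2*(i%7) - (1 if i%7 > 2 else 0).
import Mathlib
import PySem

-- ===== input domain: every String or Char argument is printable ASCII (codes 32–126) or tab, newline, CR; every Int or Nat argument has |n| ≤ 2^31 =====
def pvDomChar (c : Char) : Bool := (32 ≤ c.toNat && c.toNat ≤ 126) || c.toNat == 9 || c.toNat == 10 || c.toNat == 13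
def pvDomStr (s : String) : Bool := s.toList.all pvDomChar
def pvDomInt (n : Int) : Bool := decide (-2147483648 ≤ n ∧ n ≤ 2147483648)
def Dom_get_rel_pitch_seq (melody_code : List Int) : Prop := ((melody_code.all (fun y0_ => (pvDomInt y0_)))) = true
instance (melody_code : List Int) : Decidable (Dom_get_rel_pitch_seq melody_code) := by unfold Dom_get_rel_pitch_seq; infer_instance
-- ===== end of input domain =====

-- B replaces A's scale-table-building loop + lookup with a per-element closed form (objective: simpler).


-- ===== PORT A =====
-- In A the comprehension's index rel_pitch_seq[idx % 7] is always in range (0 ≤ idx%7 < 7 = length),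
-- so Python never raises; pyGetD's default is never used.
def SCALE_STEPS : List Int := [2, 2, 1, 2, 2, 2, 1]

def get_rel_pitch_seq (melody_code : List Int) : List Int :=
  let st := SCALE_STEPS.foldl (fun (acc : List Int × Int) step =>
    let rel := acc.1 ++ [acc.2]
    let cur := acc.2 + step
    (rel, if cur > 11 then cur - 12 else cur)) ([], 0)
  melody_code.map (fun idx => PySem.List.pyGetD st.1 (PySem.Int.mod idx 7) 0)

-- ===== PORT B =====
def get_rel_pitch_seq_alt (melody_code : List Int) : List Int :=
  melody_code.map (fun i =>
    2 * PySem.Int.mod i 7 - (if PySem.Int.mod i 7 > 2 then 1 else 0))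

-- ===== PRECONDITION & SPEC =====
def Spec_get_rel_pitch_seq (melody_code : List Int) (out : List Int) : Prop := out = get_rel_pitch_seq_alt melody_code
instance (melody_code : List Int) (out : List Int) : Decidable (Spec_get_rel_pitch_seq melody_code out) := by unfold Spec_get_rel_pitch_seq; infer_instance

-- ===== CLAIM (what is proved, stated in full; the proofs are below) =====
def Claim_equal_get_rel_pitch_seq : Prop := ∀ (melody_code : List Int), Dom_get_rel_pitch_seq melody_code → Spec_get_rel_pitch_seq melody_code (get_rel_pitch_seq melody_code)

-- ===== LEMMAS AND PROOFS =====

-- ===== VERDICT (by name: the statement is the Claim_ definition above) =====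
theorem get_rel_pitch_seq_spec : Claim_equal_get_rel_pitch_seq := by
  intro melody_code _
  unfold Spec_get_rel_pitch_seq get_rel_pitch_seq get_rel_pitch_seq_alt SCALE_STEPS
  simp only [List.foldl]
  refine List.map_congr_left (fun idx _ => ?_)
  have h0 := PySem.Int.mod_nonneg idx (b := 7) (by norm_num)
  have h7 := PySem.Int.mod_lt idx (b := 7) (by norm_num)
  set d := PySem.Int.mod idx 7 with hd
  interval_cases d <;> decide
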